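-- pv_equiv track=rewrite | github.com/Jwmc999/Coding-test | Ch5/BFS/안전지대.py | solution
-- ===== SOURCE A (Python) =====
-- def solution(board):
--     n = len(board)
--     dx = [-1, 1, 0, 0, -1, 1, -1, 1]
--     dy = [0, 0, -1, 1, -1, 1, 1, -1]
--     cnt = 0
--     for x in range(n):
--         for y in range(n):
--             if board[x][y] == 0:
--                 surr = []
--                 nx = [i+x for i in dx]
--                 ny = [i+y for i in dy]
--                 for i in range(8):
--                     if 0<=nx[i]<n and 0<=ny[i]<n:
--                         surr.append(board[nx[i]][ny[i]])
--                 if all(s==0 for s in surr):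
--                     cnt += 1
--             else:
--                 continue
--
--
--     answer = cnt
--     return answer
-- ===== SOURCE B (Python) =====
-- def solution(board):
--     n = len(board)
--     offs = ((-1, 0), (1, 0), (0, -1), (0, 1), (-1, -1), (1, 1), (-1, 1), (1, -1))
--     unsafe = {(x + dx, y + dy)
--               for x in range(n) for y in range(n) if board[x][y] != 0
--               for dx, dy in offs}
--     return sum(1 for x in range(n) for y in range(n)
--                if board[x][y] == 0 and (x, y) not in unsafe)
-- ===== Notes on version B (the rewrite author's own statement) =====
-- stated objective: alternative
-- what changed: Instead of gathering each zero cell's 8-neighborhood into a list and checking it, B scatters: one set comprehension collects every coordinate adjacent to a nonzero cell, then a single pass counts zero cells not in that set.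
import Mathlib
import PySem

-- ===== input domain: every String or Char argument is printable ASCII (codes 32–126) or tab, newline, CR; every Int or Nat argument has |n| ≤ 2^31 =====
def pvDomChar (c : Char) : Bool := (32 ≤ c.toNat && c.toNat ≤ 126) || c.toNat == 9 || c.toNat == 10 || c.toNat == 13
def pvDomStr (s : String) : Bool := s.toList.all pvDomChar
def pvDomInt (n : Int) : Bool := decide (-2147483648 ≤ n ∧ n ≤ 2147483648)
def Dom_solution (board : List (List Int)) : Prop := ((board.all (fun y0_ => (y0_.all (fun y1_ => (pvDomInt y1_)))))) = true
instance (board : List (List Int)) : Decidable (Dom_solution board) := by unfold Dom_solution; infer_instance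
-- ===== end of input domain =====

-- B replaces A's per-zero-cell gather of the 8-neighborhood by one scatter pass: a set of all
-- coordinates adjacent to a nonzero cell, then a count of zero cells not in it (alternative algorithm, similar cost).

-- ===== PORT A =====
def solution (board : List (List Int)) : Int :=
  let n : Int := board.length
  let dx : List Int := [-1, 1, 0, 0, -1, 1, -1, 1]
  let dy : List Int := [0, 0, -1, 1, -1, 1, 1, -1]
  (PySem.List.pyRange 0 n 1).foldl (fun cnt x =>
    (PySem.List.pyRange 0 n 1).foldl (fun cnt y =>
      if PySem.List.pyGetD (PySem.List.pyGetD board x []) y 0 = 0 then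
        let nx := dx.map (fun i => i + x)
        let ny := dy.map (fun i => i + y)
        let surr := (PySem.List.pyRange 0 8 1).foldl (fun surr i =>
          if 0 ≤ PySem.List.pyGetD nx i 0 ∧ PySem.List.pyGetD nx i 0 < n ∧
             0 ≤ PySem.List.pyGetD ny i 0 ∧ PySem.List.pyGetD ny i 0 < n then
            surr ++ [PySem.List.pyGetD (PySem.List.pyGetD board (PySem.List.pyGetD nx i 0) []) (PySem.List.pyGetD ny i 0) 0]
          else surr) ([] : List Int)
        if surr.all (fun s => s == 0) then cnt + 1 else cnt
      else cnt) cnt) 0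

-- ===== PORT B =====
def offs : List (Int × Int) := [(-1, 0), (1, 0), (0, -1), (0, 1), (-1, -1), (1, 1), (-1, 1), (1, -1)]

def solution_alt (board : List (List Int)) : Int :=
  let n : Int := board.length
  let marked : PySem.Set (Int × Int) := PySem.Set.ofList
    ((PySem.List.pyRange 0 n 1).flatMap (fun x =>
      (PySem.List.pyRange 0 n 1).flatMap (fun y =>
        if PySem.List.pyGetD (PySem.List.pyGetD board x []) y 0 ≠ 0 then
          offs.map (fun p => (x + p.1, y + p.2))
        else [])))
  ((PySem.List.pyRange 0 n 1).flatMap (fun x =>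
    (PySem.List.pyRange 0 n 1).flatMap (fun y =>
      if PySem.List.pyGetD (PySem.List.pyGetD board x []) y 0 = 0 ∧ (x, y) ∉ marked then
        [(1 : Int)]
      else []))).sum

-- ===== PRECONDITION & SPEC =====
-- Pre_ excludes exactly the boards on which the Python A raises IndexError: a row shorter than len(board).
def Pre_solution (board : List (List Int)) : Prop :=
  ∀ r ∈ board, board.length ≤ r.length
instance (board : List (List Int)) : Decidable (Pre_solution board) := by unfold Pre_solution; infer_instance

def pvWitness_solution : List (List Int) := [[0, 7], [0, 0]]

def Spec_solution (board : List (List Int)) (out : Int) : Prop := out = solution_alt board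
instance (board : List (List Int)) (out : Int) : Decidable (Spec_solution board out) := by unfold Spec_solution; infer_instance

-- ===== CLAIM (what is proved, stated in full; the proofs are below) =====
def Claim_equal_solution : Prop := ∀ (board : List (List Int)), Dom_solution board → Pre_solution board → Spec_solution board (solution board)

-- ===== LEMMAS AND PROOFS =====

def gB (board : List (List Int)) (x y : Int) : Int :=
  PySem.List.pyGetD (PySem.List.pyGetD board x []) y 0
abbrev nbr (board : List (List Int)) (n x y : Int) : Prop :=
  ∃ p ∈ offs, 0 ≤ x + p.1 ∧ x + p.1 < n ∧ 0 ≤ y + p.2 ∧ y + p.2 < n ∧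
    gB board (x + p.1) (y + p.2) ≠ 0
theorem himp (a b c P : Prop) (u v : Int) :
    ((a → b → c → u ≤ v) ∨ P) ↔ (a → b → c → v < u → P) := by
  constructor
  · rintro (h | hP) ha hb hc hvu
    · exact absurd (h ha hb hc) (by omega)
    · exact hP
  · intro h
    by_cases ha : a
    · by_cases hb : b
      · by_cases hc : c
        · rcases (by omega : u ≤ v ∨ v < u) with hle | hlt
          · exact Or.inl fun _ _ _ => hle
          · exact Or.inr (h ha hb hc hlt)
        · exact Or.inl fun _ _ hc' => absurd hc' hc
      · exact Or.inl fun _ hb' _ => absurd hb' hb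
    · exact Or.inl fun ha' _ _ => absurd ha' ha

set_option maxHeartbeats 1000000 in
theorem surr_all (board : List (List Int)) (n x y : Int) :
    ((((PySem.List.pyRange 0 8 1).filter (fun i => decide (
        0 ≤ PySem.List.pyGetD (([-1, 1, 0, 0, -1, 1, -1, 1] : List Int).map (fun i => i + x)) i 0 ∧
        PySem.List.pyGetD (([-1, 1, 0, 0, -1, 1, -1, 1] : List Int).map (fun i => i + x)) i 0 < n ∧
        0 ≤ PySem.List.pyGetD (([0, 0, -1, 1, -1, 1, 1, -1] : List Int).map (fun i => i + y)) i 0 ∧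
        PySem.List.pyGetD (([0, 0, -1, 1, -1, 1, 1, -1] : List Int).map (fun i => i + y)) i 0 < n))).map
      (fun i => PySem.List.pyGetD (PySem.List.pyGetD board (PySem.List.pyGetD (([-1, 1, 0, 0, -1, 1, -1, 1] : List Int).map (fun i => i + x)) i 0) []) (PySem.List.pyGetD (([0, 0, -1, 1, -1, 1, 1, -1] : List Int).map (fun i => i + y)) i 0) 0)).all
      (fun s => s == 0) = true)
    ↔ ¬ nbr board n x y := by
  rw [show PySem.List.pyRange 0 8 1 = [0,1,2,3,4,5,6,7] from by decide]
  simp only [List.map, List.all_map, List.all_filter, List.all_cons, List.all_nil,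
    PySem.List.pyGetD_ofNat', List.getD, List.getElem?_cons_zero, List.getElem?_cons_succ,
    Option.getD_some, Function.comp]
  simp only [Bool.and_eq_true, Bool.or_eq_true, Bool.not_eq_true', decide_eq_false_iff_not,
    beq_iff_eq, and_true]
  simp only [nbr, offs, gB, List.mem_cons, List.not_mem_nil, or_false, exists_eq_or_imp,
    exists_eq_left]
  push Not
  ring_nf
  simp only [himp]

set_option maxHeartbeats 1000000 in
theorem a_cell (board : List (List Int)) (n x y : Int) (cnt : Int) :
    (if PySem.List.pyGetD (PySem.List.pyGetD board x []) y 0 = 0 then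
        if ((PySem.List.pyRange 0 8 1).foldl (fun surr i =>
          if 0 ≤ PySem.List.pyGetD (([-1, 1, 0, 0, -1, 1, -1, 1] : List Int).map (fun i => i + x)) i 0 ∧
             PySem.List.pyGetD (([-1, 1, 0, 0, -1, 1, -1, 1] : List Int).map (fun i => i + x)) i 0 < n ∧
             0 ≤ PySem.List.pyGetD (([0, 0, -1, 1, -1, 1, 1, -1] : List Int).map (fun i => i + y)) i 0 ∧
             PySem.List.pyGetD (([0, 0, -1, 1, -1, 1, 1, -1] : List Int).map (fun i => i + y)) i 0 < n then
            surr ++ [PySem.List.pyGetD (PySem.List.pyGetD board (PySem.List.pyGetD (([-1, 1, 0, 0, -1, 1, -1, 1] : List Int).map (fun i => i + x)) i 0) []) (PySem.List.pyGetD (([0, 0, -1, 1, -1, 1, 1, -1] : List Int).map (fun i => i + y)) i 0) 0]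
          else surr) ([] : List Int)).all (fun s => s == 0) then cnt + 1 else cnt
      else cnt)
    = if gB board x y = 0 ∧ ¬ nbr board n x y then cnt + 1 else cnt := by
  rw [PySem.List.foldl_append_ite
      (p := fun i => 0 ≤ PySem.List.pyGetD (([-1, 1, 0, 0, -1, 1, -1, 1] : List Int).map (fun i => i + x)) i 0 ∧
        PySem.List.pyGetD (([-1, 1, 0, 0, -1, 1, -1, 1] : List Int).map (fun i => i + x)) i 0 < n ∧
        0 ≤ PySem.List.pyGetD (([0, 0, -1, 1, -1, 1, 1, -1] : List Int).map (fun i => i + y)) i 0 ∧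
        PySem.List.pyGetD (([0, 0, -1, 1, -1, 1, 1, -1] : List Int).map (fun i => i + y)) i 0 < n)
      (f := fun i => PySem.List.pyGetD (PySem.List.pyGetD board (PySem.List.pyGetD (([-1, 1, 0, 0, -1, 1, -1, 1] : List Int).map (fun i => i + x)) i 0) []) (PySem.List.pyGetD (([0, 0, -1, 1, -1, 1, 1, -1] : List Int).map (fun i => i + y)) i 0) 0)]
  rw [List.nil_append]
  simp only [surr_all board n x y]
  by_cases hg : PySem.List.pyGetD (PySem.List.pyGetD board x []) y 0 = 0 <;>
    by_cases hn : nbr board n x y <;>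
    simp [hg, hn, gB]

set_option maxHeartbeats 1000000 in
theorem mem_marked (board : List (List Int)) (x y : Int)
    (hx0 : 0 ≤ x) (hxn : x < (board.length : Int)) (hy0 : 0 ≤ y) (hyn : y < (board.length : Int)) :
    ((x, y) ∈ PySem.Set.ofList
      ((PySem.List.pyRange 0 (board.length : Int) 1).flatMap (fun a =>
        (PySem.List.pyRange 0 (board.length : Int) 1).flatMap (fun b =>
          if PySem.List.pyGetD (PySem.List.pyGetD board a []) b 0 ≠ 0 then
            offs.map (fun p => (a + p.1, b + p.2))
          else []))))
    ↔ nbr board (board.length : Int) x y := by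
  set n : Int := (board.length : Int) with hn
  rw [PySem.Set.mem_ofList]
  simp only [List.mem_flatMap, List.mem_ite_nil_right, List.mem_map,
    PySem.List.mem_pyRange_one, nbr, offs, gB, List.mem_cons, List.not_mem_nil, or_false,
    exists_eq_or_imp, exists_eq_left, Prod.mk.injEq]
  constructor
  · rintro ⟨a, ⟨ha0, han⟩, b, ⟨hb0, hbn⟩, hne, hcase⟩
    rcases hcase with ⟨hx, hy⟩ | ⟨hx, hy⟩ | ⟨hx, hy⟩ | ⟨hx, hy⟩ | ⟨hx, hy⟩ | ⟨hx, hy⟩ | ⟨hx, hy⟩ | ⟨hx, hy⟩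
    · have ha : a = x + (1) := by omega
      have hb : b = y + (0) := by omega
      rw [ha, hb] at hne
      exact Or.inr (Or.inl ⟨by omega, by omega, by omega, by omega, hne⟩)
    · have ha : a = x + (-1) := by omega
      have hb : b = y + (0) := by omega
      rw [ha, hb] at hne
      exact Or.inl ⟨by omega, by omega, by omega, by omega, hne⟩
    · have ha : a = x + (0) := by omega
      have hb : b = y + (1) := by omega
      rw [ha, hb] at hne
      exact Or.inr (Or.inr (Or.inr (Or.inl ⟨by omega, by omega, by omega, by omega, hne⟩)))
    · have ha : a = x + (0) := by omega
      have hb : b = y + (-1) := by omega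
      rw [ha, hb] at hne
      exact Or.inr (Or.inr (Or.inl ⟨by omega, by omega, by omega, by omega, hne⟩))
    · have ha : a = x + (1) := by omega
      have hb : b = y + (1) := by omega
      rw [ha, hb] at hne
      exact Or.inr (Or.inr (Or.inr (Or.inr (Or.inr (Or.inl ⟨by omega, by omega, by omega, by omega, hne⟩)))))
    · have ha : a = x + (-1) := by omega
      have hb : b = y + (-1) := by omega
      rw [ha, hb] at hne
      exact Or.inr (Or.inr (Or.inr (Or.inr (Or.inl ⟨by omega, by omega, by omega, by omega, hne⟩))))
    · have ha : a = x + (1) := by omega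
      have hb : b = y + (-1) := by omega
      rw [ha, hb] at hne
      exact Or.inr (Or.inr (Or.inr (Or.inr (Or.inr (Or.inr (Or.inr (⟨by omega, by omega, by omega, by omega, hne⟩)))))))
    · have ha : a = x + (-1) := by omega
      have hb : b = y + (1) := by omega
      rw [ha, hb] at hne
      exact Or.inr (Or.inr (Or.inr (Or.inr (Or.inr (Or.inr (Or.inl ⟨by omega, by omega, by omega, by omega, hne⟩))))))
  · intro h
    rcases h with hh | hh | hh | hh | hh | hh | hh | hh
    · exact ⟨x + (-1), ⟨by omega, by omega⟩, y + (0), ⟨by omega, by omega⟩, hh.2.2.2.2, Or.inr (Or.inl ⟨by omega, by omega⟩)⟩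
    · exact ⟨x + (1), ⟨by omega, by omega⟩, y + (0), ⟨by omega, by omega⟩, hh.2.2.2.2, Or.inl ⟨by omega, by omega⟩⟩
    · exact ⟨x + (0), ⟨by omega, by omega⟩, y + (-1), ⟨by omega, by omega⟩, hh.2.2.2.2, Or.inr (Or.inr (Or.inr (Or.inl ⟨by omega, by omega⟩)))⟩
    · exact ⟨x + (0), ⟨by omega, by omega⟩, y + (1), ⟨by omega, by omega⟩, hh.2.2.2.2, Or.inr (Or.inr (Or.inl ⟨by omega, by omega⟩))⟩
    · exact ⟨x + (-1), ⟨by omega, by omega⟩, y + (-1), ⟨by omega, by omega⟩, hh.2.2.2.2, Or.inr (Or.inr (Or.inr (Or.inr (Or.inr (Or.inl ⟨by omega, by omega⟩)))))⟩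
    · exact ⟨x + (1), ⟨by omega, by omega⟩, y + (1), ⟨by omega, by omega⟩, hh.2.2.2.2, Or.inr (Or.inr (Or.inr (Or.inr (Or.inl ⟨by omega, by omega⟩))))⟩
    · exact ⟨x + (-1), ⟨by omega, by omega⟩, y + (1), ⟨by omega, by omega⟩, hh.2.2.2.2, Or.inr (Or.inr (Or.inr (Or.inr (Or.inr (Or.inr (Or.inr (⟨by omega, by omega⟩)))))))⟩
    · exact ⟨x + (1), ⟨by omega, by omega⟩, y + (-1), ⟨by omega, by omega⟩, hh.2.2.2.2, Or.inr (Or.inr (Or.inr (Or.inr (Or.inr (Or.inr (Or.inl ⟨by omega, by omega⟩))))))⟩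

theorem sum_flatMap_int (l : List Int) (f : Int → List Int) :
    (l.flatMap f).sum = (l.map (fun x => (f x).sum)).sum := by
  induction l with
  | nil => simp
  | cons a t ih => simp [List.flatMap_cons, ih]

set_option maxHeartbeats 1000000 in
theorem solution_eq_alt (board : List (List Int)) :
    solution board = solution_alt board := by
  unfold solution solution_alt
  simp only [a_cell board ((board.length : Int)), PySem.List.foldl_ite_add_one,
    PySem.List.foldl_add, zero_add, sum_flatMap_int]
  refine congrArg List.sum (List.map_congr_left ?_)
  intro x hx
  rw [PySem.List.mem_pyRange_one] at hx
  rw [← PySem.List.sum_map_ite_one_zero]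
  refine congrArg List.sum (List.map_congr_left ?_)
  intro y hy
  rw [PySem.List.mem_pyRange_one] at hy
  simp only [decide_eq_true_eq]
  have hset := mem_marked board x y hx.1 hx.2 hy.1 hy.2
  rw [if_congr (and_congr_right fun _ => (not_congr hset).symm) rfl rfl]
  simp only [gB]
  split <;> simp

-- ===== VERDICT (by name: the statement is the Claim_ definition above) =====
theorem solution_spec : Claim_equal_solution := by
  intro board _ _
  unfold Spec_solution
  exact solution_eq_alt board
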